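-- pv_equiv track=rewrite | github.com/jpmesperanca/QCS | Code/blackboxTests.py | findMax
-- ===== SOURCE A (Python) =====
-- def findMax(R, C, S):
--     max_of_s = S[0][0]
--     max_i = 0
--     max_j = 0
--
--     for i in range(R):
--         for j in range(C):
--             if (max_of_s < S[i][j]):
--                 max_of_s = S[i][j]
--                 max_i = i
--                 max_j = j
--
--     return [[max_of_s, max_i, max_j]]
-- ===== SOURCE B (Python) =====
-- def findMax(R, C, S):
--     m = S[0][0]
--     for i in range(R):
--         for j in range(C):
--             if S[i][j] > m:
--                 m = S[i][j]
--     for i in range(R):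
--         for j in range(C):
--             if S[i][j] == m:
--                 return [[m, i, j]]
--     return [[m, 0, 0]]
-- ===== Notes on version B (the rewrite author's own statement) =====
-- stated objective: alternative
-- what changed: B replaces A's single fold that tracks (max value, argmax indices) together by two passes: first compute only the maximum value, then rescan in row-major order and return at its first position.
import Mathlib
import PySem

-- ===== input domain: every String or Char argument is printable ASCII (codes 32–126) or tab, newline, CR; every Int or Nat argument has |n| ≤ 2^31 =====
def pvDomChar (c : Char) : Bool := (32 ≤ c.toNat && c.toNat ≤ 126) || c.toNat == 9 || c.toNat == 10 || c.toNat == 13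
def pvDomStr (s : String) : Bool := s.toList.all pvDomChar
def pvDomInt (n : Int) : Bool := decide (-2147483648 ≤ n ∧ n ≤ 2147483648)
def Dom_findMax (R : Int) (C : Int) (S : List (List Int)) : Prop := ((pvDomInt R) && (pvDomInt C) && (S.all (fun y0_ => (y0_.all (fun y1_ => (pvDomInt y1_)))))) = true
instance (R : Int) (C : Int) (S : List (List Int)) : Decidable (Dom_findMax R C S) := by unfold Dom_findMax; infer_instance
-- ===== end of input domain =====

-- B computes the maximum value in one pass and then rescans row-major for its first
-- position, instead of A's single fold tracking value and indices together (alternative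
-- decomposition, same cost).


-- ===== PORT A =====
def findMax (R : Int) (C : Int) (S : List (List Int)) : List (List Int) :=
  -- max_of_s = S[0][0]; max_i = 0; max_j = 0
  let st0 : Int × Int × Int := (PySem.List.pyGetD (PySem.List.pyGetD S 0 []) 0 0, 0, 0)
  -- for i in range(R): for j in range(C): if max_of_s < S[i][j]: update all three
  let st :=
    (PySem.List.pyRange 0 R 1).foldl (fun st i =>
      (PySem.List.pyRange 0 C 1).foldl (fun st j =>
        if st.1 < PySem.List.pyGetD (PySem.List.pyGetD S i []) j 0 then
          (PySem.List.pyGetD (PySem.List.pyGetD S i []) j 0, i, j)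
        else st) st) st0
  [[st.1, st.2.1, st.2.2]]

-- ===== PORT B =====
def findMax_alt (R : Int) (C : Int) (S : List (List Int)) : List (List Int) :=
  -- m = S[0][0]; first pass: value only
  let m0 : Int := PySem.List.pyGetD (PySem.List.pyGetD S 0 []) 0 0
  let m :=
    (PySem.List.pyRange 0 R 1).foldl (fun m i =>
      (PySem.List.pyRange 0 C 1).foldl (fun m j =>
        if m < PySem.List.pyGetD (PySem.List.pyGetD S i []) j 0 then
          PySem.List.pyGetD (PySem.List.pyGetD S i []) j 0
        else m) m) m0
  -- second pass: return at the first row-major position holding m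
  match
    (PySem.List.pyRange 0 R 1).findSome? (fun i =>
      (PySem.List.pyRange 0 C 1).findSome? (fun j =>
        if PySem.List.pyGetD (PySem.List.pyGetD S i []) j 0 = m then some [[m, i, j]]
        else none)) with
  | some r => r
  | none => [[m, 0, 0]]

-- ===== PRECONDITION & SPEC =====
-- Pre_ excludes exactly the inputs where Python A raises IndexError: empty S or empty
-- first row (S[0][0]), and — only when the inner loop actually runs (0 < C) — R beyond
-- the number of rows or a scanned row shorter than C.
def Pre_findMax (R : Int) (C : Int) (S : List (List Int)) : Prop :=
  S ≠ [] ∧ S.headI ≠ [] ∧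
    (0 < C → R ≤ (S.length : Int) ∧ ∀ row ∈ S.take R.toNat, C ≤ (row.length : Int))
instance (R : Int) (C : Int) (S : List (List Int)) : Decidable (Pre_findMax R C S) := by
  unfold Pre_findMax; infer_instance
def pvWitness_findMax : Int × Int × List (List Int) := (2, 2, [[1, 5], [3, 2]])

def Spec_findMax (R : Int) (C : Int) (S : List (List Int)) (out : List (List Int)) : Prop := out = findMax_alt R C S
instance (R : Int) (C : Int) (S : List (List Int)) (out : List (List Int)) : Decidable (Spec_findMax R C S out) := by unfold Spec_findMax; infer_instance

-- ===== CLAIM (what is proved, stated in full; the proofs are below) =====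
def Claim_equal_findMax : Prop := ∀ (R : Int) (C : Int) (S : List (List Int)), Dom_findMax R C S → Pre_findMax R C S → Spec_findMax R C S (findMax R C S)

-- ===== LEMMAS AND PROOFS =====

-- the running maximum of `f` over a list of positions, started at m
def pvMax (f : Int × Int → Int) (m : Int) (L : List (Int × Int)) : Int :=
  L.foldl (fun m p => if m < f p then f p else m) m

lemma le_pvMax (f : Int × Int → Int) :
    ∀ (L : List (Int × Int)) (m : Int), m ≤ pvMax f m L := by
  intro L
  induction L with
  | nil => intro m; simp [pvMax]
  | cons p t ih =>
    intro m
    simp only [pvMax, List.foldl_cons]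
    split_ifs with hc
    · have h := ih (f p); simp only [pvMax] at h; omega
    · have h := ih m; simp only [pvMax] at h; omega

lemma pvMax_attain (f : Int × Int → Int) :
    ∀ (L : List (Int × Int)) (m : Int), m < pvMax f m L →
      ∃ x ∈ L, f x = pvMax f m L := by
  intro L
  induction L with
  | nil => intro m h; simp [pvMax] at h
  | cons p t ih =>
    intro m h
    simp only [pvMax, List.foldl_cons] at h ⊢
    by_cases hc : (if m < f p then f p else m) < pvMax f (if m < f p then f p else m) t
    · obtain ⟨x, hx, hfx⟩ := ih _ hc
      exact ⟨x, by simp [hx], hfx⟩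
    · have hle := le_pvMax f t (if m < f p then f p else m)
      have heq : pvMax f (if m < f p then f p else m) t = (if m < f p then f p else m) := by
        omega
      simp only [pvMax] at heq
      rw [heq] at h ⊢
      split_ifs at h ⊢ with hp
      · exact ⟨p, by simp, rfl⟩
      · omega

-- A's tracking fold characterised: the value is pvMax, the position is the first
-- occurrence of pvMax if the initial value was improved, else the initial position.
lemma foldA_eq (f : Int × Int → Int) :
    ∀ (L : List (Int × Int)) (m : Int) (ab : Int × Int),
      L.foldl (fun st p => if st.1 < f p then (f p, p) else st) (m, ab)
        = if m < pvMax f m L then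
            (pvMax f m L, (L.find? (fun p => decide (f p = pvMax f m L))).getD ab)
          else (m, ab) := by
  intro L
  induction L with
  | nil => intro m ab; simp [pvMax]
  | cons p t ih =>
    intro m ab
    have hM : pvMax f m (p :: t) = pvMax f (if m < f p then f p else m) t := by
      simp [pvMax]
    simp only [List.foldl_cons]
    by_cases hp : m < f p
    · rw [if_pos hp]
      rw [ih (f p) p]
      have hle := le_pvMax f t (f p)
      rw [hM, if_pos hp] at *
      have hmlt : m < pvMax f (f p) t := by omega
      rw [if_pos hmlt]
      by_cases h2 : f p < pvMax f (f p) t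
      · rw [if_pos h2]
        obtain ⟨x, hx, hfx⟩ := pvMax_attain f t (f p) h2
        have hne : ¬ (f p = pvMax f (f p) t) := by omega
        rw [List.find?_cons_of_neg (by simpa using hne)]
        have hsome : (t.find? (fun q => decide (f q = pvMax f (f p) t))).isSome := by
          rw [List.find?_isSome]
          exact ⟨x, hx, by simpa using hfx⟩
        obtain ⟨q, hq⟩ := Option.isSome_iff_exists.mp hsome
        rw [hq]
        simp
      · rw [if_neg h2]
        have heq : pvMax f (f p) t = f p := by omega
        rw [heq]
        rw [List.find?_cons_of_pos (by simp)]
        simp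
    · rw [if_neg hp]
      rw [ih m ab]
      rw [hM, if_neg hp]
      by_cases h2 : m < pvMax f m t
      · rw [if_pos h2, if_pos h2]
        have hne : ¬ (f p = pvMax f m t) := by omega
        rw [List.find?_cons_of_neg (by simpa using hne)]
      · rw [if_neg h2, if_neg h2]

-- nested foldl over two index ranges = foldl over the flattened position list
lemma foldl_nested {σ : Type} (A B : List Int) (F : σ → Int × Int → σ) (init : σ) :
    A.foldl (fun st i => B.foldl (fun st j => F st (i, j)) st) init
      = (A.flatMap (fun i => B.map (fun j => (i, j)))).foldl F init := by
  induction A generalizing init with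
  | nil => simp
  | cons a t ih => simp [List.foldl_append, List.foldl_map, ih]

-- nested findSome? over two index ranges = findSome? over the flattened position list
lemma findSome?_nested {σ : Type} (A B : List Int) (F : Int × Int → Option σ) :
    A.findSome? (fun i => B.findSome? (fun j => F (i, j)))
      = (A.flatMap (fun i => B.map (fun j => (i, j)))).findSome? F := by
  induction A with
  | nil => simp
  | cons a t ih =>
    simp only [List.findSome?_cons, List.flatMap_cons, List.findSome?_append,
      List.findSome?_map, ih]
    cases hx : List.findSome? (fun j => F (a, j)) B <;> simp [Function.comp_def, hx]

lemma findSome?_if {σ : Type} (q : Int × Int → Prop) [DecidablePred q]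
    (h : Int × Int → σ) :
    ∀ (L : List (Int × Int)),
      L.findSome? (fun p => if q p then some (h p) else none)
        = (L.find? (fun p => decide (q p))).map h := by
  intro L
  induction L with
  | nil => simp
  | cons p t ih =>
    simp only [List.findSome?_cons, List.find?_cons]
    by_cases hq : q p <;> simp [hq, ih]

-- ===== VERDICT (by name: the statement is the Claim_ definition above) =====
theorem findMax_spec : Claim_equal_findMax := by
  intro R C S _ _
  unfold Spec_findMax findMax findMax_alt
  set f : Int × Int → Int := fun p => PySem.List.pyGetD (PySem.List.pyGetD S p.1 []) p.2 0 with hf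
  set m0 : Int := PySem.List.pyGetD (PySem.List.pyGetD S 0 []) 0 0 with hm0
  set cells : List (Int × Int) :=
    (PySem.List.pyRange 0 R 1).flatMap (fun i => (PySem.List.pyRange 0 C 1).map (fun j => (i, j)))
    with hcells
  have hA :
      (PySem.List.pyRange 0 R 1).foldl (fun st i =>
        (PySem.List.pyRange 0 C 1).foldl (fun st j =>
          if st.1 < PySem.List.pyGetD (PySem.List.pyGetD S i []) j 0 then
            (PySem.List.pyGetD (PySem.List.pyGetD S i []) j 0, i, j)
          else st) st) (m0, (0 : Int), (0 : Int))
        = cells.foldl (fun st p => if st.1 < f p then (f p, p) else st) (m0, ((0 : Int), (0 : Int))) := by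
    rw [hcells]
    exact foldl_nested _ _ (fun st p => if st.1 < f p then (f p, p) else st) _
  have hB :
      (PySem.List.pyRange 0 R 1).foldl (fun m i =>
        (PySem.List.pyRange 0 C 1).foldl (fun m j =>
          if m < PySem.List.pyGetD (PySem.List.pyGetD S i []) j 0 then
            PySem.List.pyGetD (PySem.List.pyGetD S i []) j 0
          else m) m) m0
        = pvMax f m0 cells := by
    rw [hcells, pvMax]
    exact foldl_nested _ _ (fun (m : Int) p => if m < f p then f p else m) m0
  simp only [hA, hB]
  rw [foldA_eq]
  have hfind :
      ∀ (m : Int),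
      (PySem.List.pyRange 0 R 1).findSome? (fun i =>
        (PySem.List.pyRange 0 C 1).findSome? (fun j =>
          if PySem.List.pyGetD (PySem.List.pyGetD S i []) j 0 = m then some [[m, i, j]]
          else none))
        = (cells.find? (fun p => decide (f p = m))).map (fun p => [[m, p.1, p.2]]) := by
    intro m
    rw [hcells, ← findSome?_if (fun p => f p = m) (fun p => [[m, p.1, p.2]])]
    exact findSome?_nested _ _ (fun p => if f p = m then some [[m, p.1, p.2]] else none)
  rw [hfind]
  by_cases hlt : m0 < pvMax f m0 cells
  · rw [if_pos hlt]
    obtain ⟨x, hx, hfx⟩ := pvMax_attain f cells m0 hlt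
    have hsome : (cells.find? (fun p => decide (f p = pvMax f m0 cells))).isSome := by
      rw [List.find?_isSome]
      exact ⟨x, hx, by simpa using hfx⟩
    obtain ⟨q, hq⟩ := Option.isSome_iff_exists.mp hsome
    rw [hq]
    simp
  · rw [if_neg hlt]
    have heq : pvMax f m0 cells = m0 := by
      have := le_pvMax f cells m0; omega
    rw [heq]
    by_cases hRC : 0 < R ∧ 0 < C
    · have hcc : cells = (0, 0) :: ((PySem.List.pyRange 1 C 1).map (fun j => ((0:Int), j))
          ++ (PySem.List.pyRange 1 R 1).flatMap (fun i => (PySem.List.pyRange 0 C 1).map (fun j => (i, j)))) := by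
        rw [hcells, PySem.List.pyRange_one_cons (by omega : (0:Int) < R)]
        rw [List.flatMap_cons, PySem.List.pyRange_one_cons (by omega : (0:Int) < C)]
        simp
      rw [hcc]
      rw [List.find?_cons_of_pos (by simp [hf, hm0])]
      simp
    · have hnil : cells = [] := by
        rw [hcells]
        rcases not_and_or.mp hRC with h | h
        · rw [PySem.List.pyRange_one_eq_nil (a := 0) (b := R) (by omega)]; simp
        · rw [PySem.List.pyRange_one_eq_nil (a := 0) (b := C) (by omega)]; simp
      rw [hnil]
      simp
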